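-- pv_equiv track=rewrite | github.com/griptape-ai/griptape-nodes | src/griptape_nodes/retained_mode/managers/os_manager.py | _find_next_index_with_gap_fill
-- ===== SOURCE A (Python) =====
-- def _find_next_index_with_gap_fill(existing_indices: list[int]) -> int:
--     """Find next available index using fill-gaps strategy.
--
--     Args:
--         existing_indices: List of existing indices
--
--     Returns:
--         Next available index (1-based)
--
--     Examples:
--         [] -> 1
--         [1, 2, 3] -> 4
--         [1, 3, 4] -> 2 (fills gap)
--     """
--     if not existing_indices:
--         return 1
--
--     existing_indices.sort()
--     for i in range(1, max(existing_indices) + 1):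
--         if i not in existing_indices:
--             return i
--
--     return max(existing_indices) + 1
-- ===== SOURCE B (Python) =====
-- def _find_next_index_with_gap_fill(existing_indices: list[int]) -> int:
--     """Smallest positive index (1-based) not in the list: sort the distinct
--     positive values and positionally scan for the first k with pos[k] != k+1."""
--     pos = sorted(set(x for x in existing_indices if x >= 1))
--     for k, v in enumerate(pos):
--         if v != k + 1:
--             return k + 1
--     return len(pos) + 1
-- ===== Notes on version B (the rewrite author's own statement) =====
-- stated objective: alternative
-- what changed: B sorts the deduplicated positive values once and does one positional scan for the first index k with pos[k] != k+1 (no membership tests at all), replacing A's loop over candidates 1..max that rescans the whole list with 'i not in list' each iteration; it trades A's early exit on a small gap for a worst-case-better sort-and-scan.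
-- intended difference: On nonempty lists whose elements are all negative, A returns max+1 (a nonpositive value such as -2 for [-3]) because its range loop is empty, while B returns 1, the intended smallest available 1-based index. — e.g. on _find_next_index_with_gap_fill([-3]): A returns -2, B returns 1
import Mathlib
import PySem

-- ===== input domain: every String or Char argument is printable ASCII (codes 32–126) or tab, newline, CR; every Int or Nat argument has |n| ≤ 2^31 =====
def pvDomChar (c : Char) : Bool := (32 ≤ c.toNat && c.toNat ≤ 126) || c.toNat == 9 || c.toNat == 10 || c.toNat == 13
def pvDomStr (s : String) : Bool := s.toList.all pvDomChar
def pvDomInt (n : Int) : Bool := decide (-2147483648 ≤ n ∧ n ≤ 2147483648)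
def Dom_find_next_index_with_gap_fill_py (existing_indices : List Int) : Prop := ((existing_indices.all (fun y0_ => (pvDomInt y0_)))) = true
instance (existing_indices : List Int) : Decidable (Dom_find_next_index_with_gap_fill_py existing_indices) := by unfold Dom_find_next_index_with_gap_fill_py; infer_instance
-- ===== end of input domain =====

-- B sorts the deduplicated positive values once and scans positionally for the first k with
-- pos[k] != k+1, replacing A's candidate loop with list-membership rescans.
-- Note: Python A sorts its argument in place; the equivalence proved here is about the return value only.

-- ===== PORT A =====
-- the 'for i in range(1, max+1): if i not in existing_indices: return i' loop, with early
-- return; the fuel is the number of remaining range elements (m + 1 - i).toNat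
def pvGapLoopA (s : List Int) (m : Int) : Nat → Int → Int
  | 0, _ => m + 1
  | fuel + 1, i => if i ∉ s then i else pvGapLoopA s m fuel (i + 1)

def find_next_index_with_gap_fill_py (existing_indices : List Int) : Int :=
  if existing_indices = [] then 1
  else
    let s := PySem.List.sorted existing_indices (fun x => x) false
    match PySem.List.max? s (fun x => x) with
    | none => 0  -- unreachable: s is nonempty
    | some m => pvGapLoopA s m ((m + 1) - 1).toNat 1

-- ===== PORT B =====
-- the 'for k, v in enumerate(pos): if v != k + 1: return k + 1' loop plus the final
-- 'return len(pos) + 1'; k carries the number of elements already consumed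
def pvScanB : List Int → Int → Int
  | [], k => k + 1
  | v :: rest, k => if v ≠ k + 1 then k + 1 else pvScanB rest (k + 1)

def find_next_index_with_gap_fill_py_alt (existing_indices : List Int) : Int :=
  let pos := PySem.List.sorted
      (PySem.Set.ofList (existing_indices.filter (fun x => decide (1 ≤ x)))) (fun x => x) false
  pvScanB pos 0

-- ===== PRECONDITION & SPEC =====
-- On nonempty lists whose elements are all negative, A returns max+1 (a nonpositive value such as
-- -2 for [-3]) because its range loop is empty, while B returns 1, the intended smallest available
-- 1-based index.
def D_find_next_index_with_gap_fill_py (existing_indices : List Int) : Prop :=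
  existing_indices ≠ [] ∧ ∀ x ∈ existing_indices, x < 0
instance (existing_indices : List Int) : Decidable (D_find_next_index_with_gap_fill_py existing_indices) := by unfold D_find_next_index_with_gap_fill_py; infer_instance

def Spec_find_next_index_with_gap_fill_py (existing_indices : List Int) (out : Int) : Prop :=
  ¬ D_find_next_index_with_gap_fill_py existing_indices → out = find_next_index_with_gap_fill_py_alt existing_indices
instance (existing_indices : List Int) (out : Int) : Decidable (Spec_find_next_index_with_gap_fill_py existing_indices out) := by unfold Spec_find_next_index_with_gap_fill_py; infer_instance

def pvDiffWitness_find_next_index_with_gap_fill_py : List Int := [-3]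
def pvDiffWitnessOut_find_next_index_with_gap_fill_py : Int × Int := (-2, 1)

-- ===== CLAIM (what is proved, stated in full; the proofs are below) =====
def Claim_unchanged_find_next_index_with_gap_fill_py : Prop := ∀ (existing_indices : List Int), Dom_find_next_index_with_gap_fill_py existing_indices → Spec_find_next_index_with_gap_fill_py existing_indices (find_next_index_with_gap_fill_py existing_indices)
def Claim_changed_find_next_index_with_gap_fill_py : Prop := Dom_find_next_index_with_gap_fill_py (pvDiffWitness_find_next_index_with_gap_fill_py) ∧ D_find_next_index_with_gap_fill_py (pvDiffWitness_find_next_index_with_gap_fill_py) ∧ find_next_index_with_gap_fill_py (pvDiffWitness_find_next_index_with_gap_fill_py) = pvDiffWitnessOut_find_next_index_with_gap_fill_py.1 ∧ find_next_index_with_gap_fill_py_alt (pvDiffWitness_find_next_index_with_gap_fill_py) = pvDiffWitnessOut_find_next_index_with_gap_fill_py.2 ∧ pvDiffWitnessOut_find_next_index_with_gap_fill_py.1 ≠ pvDiffWitnessOut_find_next_index_with_gap_fill_py.2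
def Claim_exact_find_next_index_with_gap_fill_py : Prop := ∀ (existing_indices : List Int), Dom_find_next_index_with_gap_fill_py existing_indices → D_find_next_index_with_gap_fill_py existing_indices → find_next_index_with_gap_fill_py existing_indices ≠ find_next_index_with_gap_fill_py_alt existing_indices

-- ===== LEMMAS AND PROOFS =====

-- "r is the least integer ≥ 1 that is not in xs"
def pvGood (xs : List Int) (r : Int) : Prop :=
  1 ≤ r ∧ r ∉ xs ∧ ∀ j : Int, 1 ≤ j → j < r → j ∈ xs

theorem pvGood_unique {xs : List Int} {r r' : Int} (h : pvGood xs r) (h' : pvGood xs r') : r = r' := by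
  obtain ⟨h1, h2, h3⟩ := h
  obtain ⟨h1', h2', h3'⟩ := h'
  by_contra hne
  rcases lt_or_gt_of_ne hne with hlt | hlt
  · exact h2 (h3' r h1 hlt)
  · exact h2' (h3 r' h1' hlt)

theorem pvScanB_good : ∀ (l : List Int), l.Pairwise (· < ·) →
    ∀ k : Int, (∀ x ∈ l, k + 1 ≤ x) →
      k + 1 ≤ pvScanB l k ∧ pvScanB l k ∉ l ∧
        ∀ j : Int, k + 1 ≤ j → j < pvScanB l k → j ∈ l := by
  intro l
  induction l with
  | nil =>
    intro _ k _
    exact ⟨le_refl _, by simp [pvScanB], fun j hj1 hj2 => by simp [pvScanB] at hj2; omega⟩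
  | cons v rest ih =>
    intro hpw k hlb
    have hv : k + 1 ≤ v := hlb v (by simp)
    have hrest_gt : ∀ x ∈ rest, v < x := fun x hx => (List.pairwise_cons.mp hpw).1 x hx
    by_cases hne : v = k + 1
    · subst hne
      simp only [pvScanB, ne_eq, not_true_eq_false, if_neg, not_false_iff]
      have hlb' : ∀ x ∈ rest, (k + 1) + 1 ≤ x := fun x hx => by
        have := hrest_gt x hx; omega
      obtain ⟨a1, a2, a3⟩ := ih (List.pairwise_cons.mp hpw).2 (k + 1) hlb'
      refine ⟨by omega, ?_, ?_⟩
      · intro hmem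
        rcases List.mem_cons.mp hmem with heq | hmem'
        · omega
        · exact a2 hmem'
      · intro j hj1 hj2
        rcases eq_or_lt_of_le hj1 with rfl | hj
        · exact List.mem_cons_self
        · exact List.mem_cons_of_mem _ (a3 j (by omega) hj2)
    · simp only [pvScanB, ne_eq, hne, not_false_iff, if_pos]
      refine ⟨le_refl _, ?_, fun j hj1 hj2 => by omega⟩
      intro hmem
      rcases List.mem_cons.mp hmem with heq | hmem'
      · exact hne heq.symm
      · have := hrest_gt _ hmem'
        omega

theorem alt_good (xs : List Int) : pvGood xs (find_next_index_with_gap_fill_py_alt xs) := by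
  show pvGood xs (pvScanB (PySem.List.sorted
      (PySem.Set.ofList (xs.filter (fun x => decide (1 ≤ x)))) (fun x => x) false) 0)
  set pos := PySem.List.sorted
      (PySem.Set.ofList (xs.filter (fun x => decide (1 ≤ x)))) (fun x => x) false with hpos
  have hpw : pos.Pairwise (· < ·) := PySem.List.sorted_ofList_pairwise_lt _
  have hmem : ∀ y : Int, y ∈ pos ↔ (y ∈ xs ∧ 1 ≤ y) := by
    intro y
    rw [hpos, PySem.List.mem_sorted, PySem.Set.mem_ofList, List.mem_filter]
    simp
  have hlb : ∀ x ∈ pos, (0 : Int) + 1 ≤ x := fun x hx => by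
    have := (hmem x).mp hx; omega
  obtain ⟨a1, a2, a3⟩ := pvScanB_good pos hpw 0 hlb
  refine ⟨by omega, ?_, ?_⟩
  · intro hmemxs
    exact a2 ((hmem _).mpr ⟨hmemxs, by omega⟩)
  · intro j hj1 hj2
    exact ((hmem j).mp (a3 j (by omega) hj2)).1

theorem pvGapLoopA_good (s : List Int) (m : Int) (hmax : ∀ y ∈ s, y ≤ m) (hm0 : 0 ≤ m) :
    ∀ (n : Nat) (a : Int), (m + 1 - a).toNat = n → 1 ≤ a → a ≤ m + 1 →
      (∀ j : Int, 1 ≤ j → j < a → j ∈ s) →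
      pvGood s (pvGapLoopA s m n a) := by
  intro n
  induction n with
  | zero =>
    intro a h0 h1 h2 h3
    show pvGood s (m + 1)
    refine ⟨by omega, ?_, ?_⟩
    · intro hmem
      have := hmax _ hmem
      omega
    · intro j hj1 hj2
      exact h3 j hj1 (by omega)
  | succ n ih =>
    intro a h0 h1 h2 h3
    by_cases hmem : a ∈ s
    · simp only [pvGapLoopA, hmem, not_true_eq_false, if_false]
      refine ih (a + 1) (by omega) (by omega) (by omega) ?_
      intro j hj1 hj2
      rcases eq_or_lt_of_le (show j ≤ a by omega) with rfl | hj
      · exact hmem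
      · exact h3 j hj1 (by omega)
    · simp only [pvGapLoopA, hmem, not_false_iff, if_pos]
      exact ⟨h1, hmem, fun j hj1 hj2 => h3 j hj1 hj2⟩

theorem a_good (xs : List Int) (hd : ¬ D_find_next_index_with_gap_fill_py xs) :
    pvGood xs (find_next_index_with_gap_fill_py xs) := by
  unfold find_next_index_with_gap_fill_py
  by_cases hnil : xs = []
  · subst hnil
    simp only [if_pos]
    exact ⟨le_refl 1, by simp, fun j hj1 hj2 => by omega⟩
  · simp only [hnil, if_neg, not_false_iff]
    set s := PySem.List.sorted xs (fun x => x) false with hs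
    have hsne : s ≠ [] := by
      rw [hs, Ne, PySem.List.sorted_eq_nil_iff]
      exact hnil
    obtain ⟨m, hm⟩ : ∃ m, PySem.List.max? s (fun x => x) = some m := by
      cases h : PySem.List.max? s (fun x => x) with
      | none => exact absurd ((PySem.List.max?_eq_none_iff s (fun x => x)).mp h) hsne
      | some m => exact ⟨m, rfl⟩
    rw [hm]
    have hmemeq : ∀ y : Int, y ∈ s ↔ y ∈ xs := by
      intro y; rw [hs]; exact PySem.List.mem_sorted xs (fun x => x) false y
    have hmax : ∀ y ∈ s, y ≤ m := PySem.List.max?_isMax hm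
    obtain ⟨x, hx, hx0⟩ : ∃ x ∈ xs, (0 : Int) ≤ x := by
      unfold D_find_next_index_with_gap_fill_py at hd
      push Not at hd
      exact hd hnil
    have hm0 : 0 ≤ m := by
      have := hmax x ((hmemeq x).mpr hx)
      omega
    have hgood : pvGood s (pvGapLoopA s m ((m + 1) - 1).toNat 1) :=
      pvGapLoopA_good s m hmax hm0 ((m + 1) - 1).toNat 1 rfl (le_refl 1) (by omega)
        (fun j hj1 hj2 => by omega)
    obtain ⟨g1, g2, g3⟩ := hgood
    exact ⟨g1, fun h => g2 ((hmemeq _).mpr h), fun j hj1 hj2 => (hmemeq j).mp (g3 j hj1 hj2)⟩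

-- ===== VERDICT (by name: the statement is the Claim_ definition above) =====
theorem find_next_index_with_gap_fill_py_spec : Claim_unchanged_find_next_index_with_gap_fill_py := by
  intro xs _ hd
  exact pvGood_unique (a_good xs hd) (alt_good xs)

theorem find_next_index_with_gap_fill_py_changed : Claim_changed_find_next_index_with_gap_fill_py := by
  unfold Claim_changed_find_next_index_with_gap_fill_py; decide

theorem find_next_index_with_gap_fill_py_tight : Claim_exact_find_next_index_with_gap_fill_py := by
  intro xs _ hd
  obtain ⟨hnil, hneg⟩ := hd
  have halt : 1 ≤ find_next_index_with_gap_fill_py_alt xs := (alt_good xs).1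
  have hA : find_next_index_with_gap_fill_py xs ≤ 0 := by
    unfold find_next_index_with_gap_fill_py
    simp only [hnil, if_neg, not_false_iff]
    set s := PySem.List.sorted xs (fun x => x) false with hs
    have hsne : s ≠ [] := by
      rw [hs, Ne, PySem.List.sorted_eq_nil_iff]
      exact hnil
    obtain ⟨m, hm⟩ : ∃ m, PySem.List.max? s (fun x => x) = some m := by
      cases h : PySem.List.max? s (fun x => x) with
      | none => exact absurd ((PySem.List.max?_eq_none_iff s (fun x => x)).mp h) hsne
      | some m => exact ⟨m, rfl⟩
    rw [hm]
    have hmxs : m ∈ xs := by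
      have := PySem.List.max?_mem hm
      rw [hs] at this
      exact (PySem.List.mem_sorted xs (fun x => x) false m).mp this
    have hmneg : m < 0 := hneg m hmxs
    show pvGapLoopA s m ((m + 1) - 1).toNat 1 ≤ 0
    rw [show ((m + 1 : Int) - 1).toNat = 0 from by omega]
    show m + 1 ≤ 0
    omega
  omega
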